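-- pv_equiv track=rewrite | github.com/sajinavi2006/julomvp | mvp/src/juloserver/juloserver/julo/utils.py | convert_number_to_rupiah_terbilang
-- ===== SOURCE A (Python) =====
-- def convert_number_to_rupiah_terbilang(number):
--     thousands = ["", "Ribu", "Juta", "Miliar", "Triliun"]
--
--     if number == 0:
--         return "Nol"
--
--     is_negative = number < 0
--     number = abs(number)
--
--     word_representation = ""
--     index = 0
--
--     while number > 0:
--         three_digit_number = number % 1000
--
--         if three_digit_number != 0:
--             number_word = convert_three_digit_number_to_word(three_digit_number)
--             word_representation = number_word + " " + thousands[index] + " " + word_representation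
--
--         number //= 1000
--         index += 1
--
--     if is_negative:
--         word_representation = "Minus " + word_representation
--
--     return word_representation.strip()
--
-- def convert_three_digit_number_to_word(number):
--     ones = ["", "Satu", "Dua", "Tiga", "Empat", "Lima", "Enam", "Tujuh", "Delapan", "Sembilan"]
--     teens = ["Sepuluh", "Sebelas", "Dua Belas", "Tiga Belas", "Empat Belas",
--              "Lima Belas", "Enam Belas", "Tujuh Belas", "Delapan Belas", "Sembilan Belas"]
--     tens = ["", "", "Dua Puluh", "Tiga Puluh", "Empat Puluh", "Lima Puluh",
--             "Enam Puluh", "Tujuh Puluh", "Delapan Puluh", "Sembilan Puluh"]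
--     word = ""
--     hundred_digit = number // 100
--     remainder = number % 100
--
--     if hundred_digit != 0:
--         if hundred_digit == 1:
--             word += "Seratus "
--         else:
--             word += ones[hundred_digit] + " Ratus "
--
--     if remainder < 10:
--         word += ones[remainder]
--     elif remainder >= 10 and remainder < 20:
--         word += teens[remainder % 10]
--     else:
--         ten_digit = remainder // 10
--         one_digit = remainder % 10
--         word += tens[ten_digit] + " " + ones[one_digit]
--
--     return word.strip()
-- ===== SOURCE B (Python) =====
-- _ONES = ["", "Satu", "Dua", "Tiga", "Empat", "Lima", "Enam", "Tujuh", "Delapan", "Sembilan"]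
-- _TEENS = ["Sepuluh", "Sebelas", "Dua Belas", "Tiga Belas", "Empat Belas",
--           "Lima Belas", "Enam Belas", "Tujuh Belas", "Delapan Belas", "Sembilan Belas"]
-- _THOUSANDS = ["", "Ribu", "Juta", "Miliar", "Triliun"]
--
--
-- def _three_digit_word(n):
--     # collect the nonempty word parts and join them with single spaces
--     parts = []
--     h, r = divmod(n, 100)
--     if h == 1:
--         parts.append("Seratus")
--     elif h != 0:
--         parts.append(_ONES[h] + " Ratus")
--     if 10 <= r < 20:
--         parts.append(_TEENS[r - 10])
--     else:
--         t, o = divmod(r, 10)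
--         if t != 0:
--             parts.append(_ONES[t] + " Puluh")
--         if o != 0:
--             parts.append(_ONES[o])
--     return " ".join(parts)
--
--
-- def _groups(n, idx):
--     # emit higher-order 1000-groups first by recursing on n // 1000
--     if n == 0:
--         return ""
--     prefix = _groups(n // 1000, idx + 1)
--     g = n % 1000
--     if g != 0:
--         return prefix + _three_digit_word(g) + " " + _THOUSANDS[idx] + " "
--     return prefix
--
--
-- def convert_number_to_rupiah_terbilang(number):
--     if number == 0:
--         return "Nol"
--     word = _groups(abs(number), 0)
--     if number < 0:
--         word = "Minus " + word
--     return word.strip()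
-- ===== Notes on version B (the rewrite author's own statement) =====
-- stated objective: alternative
-- what changed: Replaces the while-loop that peels least-significant thousand-groups while prepending to an accumulator with a recursion on the quotient that appends groups most-significant-first, and rebuilds the three-digit words by joining a list of nonempty parts instead of concatenating with trailing spaces and stripping.
import Mathlib
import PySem

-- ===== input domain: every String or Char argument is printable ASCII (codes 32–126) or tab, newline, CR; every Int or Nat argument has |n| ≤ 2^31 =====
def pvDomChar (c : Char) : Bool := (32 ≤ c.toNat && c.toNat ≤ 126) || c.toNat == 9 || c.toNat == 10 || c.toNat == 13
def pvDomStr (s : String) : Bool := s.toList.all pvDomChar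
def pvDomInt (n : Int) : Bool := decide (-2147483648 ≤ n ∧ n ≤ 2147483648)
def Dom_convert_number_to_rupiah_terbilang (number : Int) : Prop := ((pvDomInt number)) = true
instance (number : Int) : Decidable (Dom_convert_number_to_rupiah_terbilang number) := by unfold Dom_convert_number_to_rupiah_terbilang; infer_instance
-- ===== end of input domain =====

-- B replaces A's least-significant-first while-loop (prepending to an accumulator) by a
-- most-significant-first recursion on n // 1000 that appends, and builds three-digit words
-- by joining nonempty parts instead of concatenating with trailing spaces and stripping.

-- ===== PORT A =====
def pvOnes : List String := ["", "Satu", "Dua", "Tiga", "Empat", "Lima", "Enam", "Tujuh", "Delapan", "Sembilan"]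
def pvTeens : List String := ["Sepuluh", "Sebelas", "Dua Belas", "Tiga Belas", "Empat Belas",
  "Lima Belas", "Enam Belas", "Tujuh Belas", "Delapan Belas", "Sembilan Belas"]
def pvTens : List String := ["", "", "Dua Puluh", "Tiga Puluh", "Empat Puluh", "Lima Puluh",
  "Enam Puluh", "Tujuh Puluh", "Delapan Puluh", "Sembilan Puluh"]
def pvThousands : List String := ["", "Ribu", "Juta", "Miliar", "Triliun"]

-- convert_three_digit_number_to_word; its argument is `number % 1000`, a Nat in [0, 999],
-- so every list index below is in range and `getD` is exact.
def pvThreeDigitA (n : Nat) : String :=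
  let hd := n / 100
  let r := n % 100
  let word : String :=
    if hd ≠ 0 then (if hd = 1 then "Seratus " else pvOnes.getD hd "" ++ " Ratus ") else ""
  let word :=
    if r < 10 then word ++ pvOnes.getD r ""
    else if r < 20 then word ++ pvTeens.getD (r % 10) ""
    else word ++ pvTens.getD (r / 10) "" ++ " " ++ pvOnes.getD (r % 10) ""
  PySem.Str.strip word

-- A's while-loop; `number` is abs of the input, so Nat `%`/`/` match Python's on it exactly.
-- `thousands[index]` is ported with getD: within |number| ≤ 2^31 a nonzero group always has
-- index ≤ 3, in range, so the default is never consulted there.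
def pvLoopA (n : Nat) (idx : Nat) (w : String) : String :=
  if h : n > 0 then
    let g := n % 1000
    let w' := if g ≠ 0 then pvThreeDigitA g ++ " " ++ pvThousands.getD idx "" ++ " " ++ w else w
    pvLoopA (n / 1000) (idx + 1) w'
  else w
termination_by n
decreasing_by exact Nat.div_lt_self h (by norm_num)

def convert_number_to_rupiah_terbilang (number : Int) : String :=
  if number = 0 then "Nol"
  else
    let w := pvLoopA number.natAbs 0 ""
    let w := if number < 0 then "Minus " ++ w else w
    PySem.Str.strip w

-- ===== PORT B =====
-- _three_digit_word: join the nonempty parts with single spaces.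
def pvThreeDigitB (n : Nat) : String :=
  let h := n / 100
  let r := n % 100
  let parts : List String :=
    (if h = 1 then ["Seratus"] else if h ≠ 0 then [pvOnes.getD h "" ++ " Ratus"] else []) ++
    (if 10 ≤ r ∧ r < 20 then [pvTeens.getD (r - 10) ""]
     else (if r / 10 ≠ 0 then [pvOnes.getD (r / 10) "" ++ " Puluh"] else []) ++
          (if r % 10 ≠ 0 then [pvOnes.getD (r % 10) ""] else []))
  PySem.Str.join " " parts

-- _groups: recursion on the quotient n // 1000, emitting higher-order groups first.
def pvGroupsB (n : Nat) (idx : Nat) : String :=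
  if h : n > 0 then
    let pre := pvGroupsB (n / 1000) (idx + 1)
    let g := n % 1000
    if g ≠ 0 then pre ++ pvThreeDigitB g ++ " " ++ pvThousands.getD idx "" ++ " " else pre
  else ""
termination_by n
decreasing_by exact Nat.div_lt_self h (by norm_num)

def convert_number_to_rupiah_terbilang_alt (number : Int) : String :=
  if number = 0 then "Nol"
  else
    let w := pvGroupsB number.natAbs 0
    let w := if number < 0 then "Minus " ++ w else w
    PySem.Str.strip w

-- ===== PRECONDITION & SPEC =====
def Spec_convert_number_to_rupiah_terbilang (number : Int) (out : String) : Prop := out = convert_number_to_rupiah_terbilang_alt number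
instance (number : Int) (out : String) : Decidable (Spec_convert_number_to_rupiah_terbilang number out) := by unfold Spec_convert_number_to_rupiah_terbilang; infer_instance

-- ===== CLAIM (what is proved, stated in full; the proofs are below) =====
def Claim_equal_convert_number_to_rupiah_terbilang : Prop := ∀ (number : Int), Dom_convert_number_to_rupiah_terbilang number → Spec_convert_number_to_rupiah_terbilang number (convert_number_to_rupiah_terbilang number)

-- ===== LEMMAS AND PROOFS =====

-- Helper descriptions of the two remainder (r = g % 100) renderings, used only by the proofs.
def pvRPart (r : Nat) : String :=
  if r < 10 then pvOnes.getD r ""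
  else if r < 20 then pvTeens.getD (r % 10) ""
  else pvTens.getD (r / 10) "" ++ " " ++ pvOnes.getD (r % 10) ""

def pvRParts (r : Nat) : List String :=
  if 10 ≤ r ∧ r < 20 then [pvTeens.getD (r - 10) ""]
  else (if r / 10 ≠ 0 then [pvOnes.getD (r / 10) "" ++ " Puluh"] else []) ++
       (if r % 10 ≠ 0 then [pvOnes.getD (r % 10) ""] else [])

-- Hundreds words: A's (with the trailing space) and B's (bare).
def pvHA (hd : Nat) : String := if hd = 1 then "Seratus " else pvOnes.getD hd "" ++ " Ratus "
def pvHB (hd : Nat) : String := if hd = 1 then "Seratus" else pvOnes.getD hd "" ++ " Ratus"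

-- The r-level facts, checked case by case (100 cases).
set_option maxRecDepth 100000 in
theorem pvRfacts : ∀ r : Nat, r < 100 →
    PySem.Chars.strip (pvRPart r).toList
      = PySem.Chars.join [' '] ((pvRParts r).map String.toList) ∧
    PySem.Chars.lstrip (pvRPart r).toList = (pvRPart r).toList ∧
    (PySem.Chars.rstrip (pvRPart r).toList = [] ↔ pvRParts r = []) := by
  decide

-- The hundreds-level facts (9 cases).
theorem pvHfacts : ∀ hd : Nat, hd < 10 → hd ≠ 0 →
    (pvHA hd).toList = (pvHB hd).toList ++ [' '] ∧
    PySem.Chars.lstrip (pvHB hd).toList = (pvHB hd).toList ∧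
    PySem.Chars.rstrip (pvHB hd).toList = (pvHB hd).toList ∧
    (pvHB hd).toList ≠ [] := by
  decide

theorem pv_lstrip_append (xs ys : List Char) (hfix : PySem.Chars.lstrip xs = xs)
    (hne : xs ≠ []) : PySem.Chars.lstrip (xs ++ ys) = xs ++ ys := by
  simp only [PySem.Chars.lstrip] at *
  rw [List.dropWhile_append, if_neg]
  · rw [hfix]
  · simp [hfix, hne]

theorem pv_rstrip_append (xs ys : List Char) :
    PySem.Chars.rstrip (xs ++ ys)
      = if PySem.Chars.rstrip ys = [] then PySem.Chars.rstrip xs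
        else xs ++ PySem.Chars.rstrip ys := by
  simp only [PySem.Chars.rstrip, List.reverse_append, List.dropWhile_append]
  by_cases h : (List.dropWhile PySem.Chars.isspace ys.reverse).isEmpty = true
  · rw [if_pos h, if_pos (by simp [List.isEmpty_iff.mp h])]
  · rw [if_neg h, if_neg (by simp [List.isEmpty_iff] at h; simp [h]),
      List.reverse_append, List.reverse_reverse]

theorem pv_join_cons (x : List Char) (l : List (List Char)) :
    PySem.Chars.join [' '] (x :: l)
      = x ++ (if l = [] then [] else ' ' :: PySem.Chars.join [' '] l) := by
  cases l with
  | nil => simp [PySem.Chars.join, List.intercalate]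
  | cons y t => simp [PySem.Chars.join, List.intercalate, List.intersperse]

-- The two three-digit renderings coincide on every possible group value.
theorem pvThreeDigit_eq (g : Nat) (hg : g < 1000) : pvThreeDigitA g = pvThreeDigitB g := by
  have hr : g % 100 < 100 := Nat.mod_lt _ (by norm_num)
  have hhd : g / 100 < 10 := by omega
  obtain ⟨hra, hrb, hrc⟩ := pvRfacts (g % 100) hr
  rw [← String.toList_inj]
  unfold pvThreeDigitA pvThreeDigitB
  simp only []
  -- fold the r-branches of both ports into pvRPart / pvRParts
  have hA : ∀ w : String,
      (if g % 100 < 10 then w ++ pvOnes.getD (g % 100) ""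
       else if g % 100 < 20 then w ++ pvTeens.getD (g % 100 % 10) ""
       else w ++ pvTens.getD (g % 100 / 10) "" ++ " " ++ pvOnes.getD (g % 100 % 10) "")
      = w ++ pvRPart (g % 100) := by
    intro w
    unfold pvRPart
    by_cases h1 : g % 100 < 10
    · rw [if_pos h1, if_pos h1]
    · rw [if_neg h1, if_neg h1]
      by_cases h2 : g % 100 < 20
      · rw [if_pos h2, if_pos h2]
      · rw [if_neg h2, if_neg h2]
        simp [String.append_assoc]
  have hB :
      (if 10 ≤ g % 100 ∧ g % 100 < 20 then [pvTeens.getD (g % 100 - 10) ""]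
       else (if g % 100 / 10 ≠ 0 then [pvOnes.getD (g % 100 / 10) "" ++ " Puluh"] else []) ++
            (if g % 100 % 10 ≠ 0 then [pvOnes.getD (g % 100 % 10) ""] else []))
      = pvRParts (g % 100) := by
    unfold pvRParts
    rfl
  rw [hA, hB]
  by_cases h0 : g / 100 ≠ 0
  · obtain ⟨hab, hl, hrs, hne⟩ := pvHfacts (g / 100) hhd h0
    rw [if_pos h0, if_pos h0]
    have hAw : (if g / 100 = 1 then ("Seratus " : String)
        else pvOnes.getD (g / 100) "" ++ " Ratus ") = pvHA (g / 100) := rfl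
    have hBw : (if g / 100 = 1 then ["Seratus"]
        else [pvOnes.getD (g / 100) "" ++ " Ratus"]) = [pvHB (g / 100)] := by
      unfold pvHB
      by_cases h1 : g / 100 = 1 <;> simp [h1]
    rw [hAw, hBw]
    simp only [PySem.Str.strip, PySem.Str.join, String.toList_ofList, String.toList_append, hab]
    have hsep : (" " : String).toList = [' '] := rfl
    rw [hsep, List.singleton_append, List.map_cons, pv_join_cons]
    have hassoc : ((pvHB (g / 100)).toList ++ [' ']) ++ (pvRPart (g % 100)).toList
        = (pvHB (g / 100)).toList ++ (' ' :: (pvRPart (g % 100)).toList) := by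
      simp
    rw [hassoc]
    unfold PySem.Chars.strip
    rw [pv_lstrip_append _ _ hl hne, pv_rstrip_append]
    have hsp : PySem.Chars.rstrip (' ' :: (pvRPart (g % 100)).toList)
        = if PySem.Chars.rstrip (pvRPart (g % 100)).toList = [] then []
          else ' ' :: PySem.Chars.rstrip (pvRPart (g % 100)).toList := by
      have := pv_rstrip_append [' '] (pvRPart (g % 100)).toList
      simpa [show PySem.Chars.rstrip [' '] = [] from by decide] using this
    rw [hsp]
    have hstrip_eq : PySem.Chars.rstrip (pvRPart (g % 100)).toList
        = PySem.Chars.join [' '] ((pvRParts (g % 100)).map String.toList) := by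
      rw [← hra]
      unfold PySem.Chars.strip
      rw [hrb]
    by_cases hemp : pvRParts (g % 100) = []
    · have h1 : PySem.Chars.rstrip (pvRPart (g % 100)).toList = [] := hrc.mpr hemp
      rw [if_pos h1, hrs]
      simp [List.map_eq_nil_iff.mpr hemp]
    · have h1 : PySem.Chars.rstrip (pvRPart (g % 100)).toList ≠ [] := fun h => hemp (hrc.mp h)
      rw [if_neg h1, if_neg (by simp [hemp]), hstrip_eq]
      congr 1
      cases hl' : (pvRParts (g % 100)).map String.toList with
      | nil => exact absurd (List.map_eq_nil_iff.mp hl') hemp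
      | cons y t => rfl
  · have h1 : g / 100 ≠ 1 := by omega
    rw [if_neg h0, if_neg h1, if_neg h0]
    simp only [PySem.Str.strip, PySem.Str.join, String.toList_ofList, String.toList_append]
    have : ("" : String).toList = [] := rfl
    rw [this]
    simp only [List.nil_append]
    exact hra

-- A's loop with accumulator w equals B's recursion with w appended on the right.
theorem pvLoop_eq (n idx : Nat) (w : String) : pvLoopA n idx w = pvGroupsB n idx ++ w := by
  induction n using Nat.strong_induction_on generalizing idx w with
  | _ n ih =>
    rw [pvLoopA, pvGroupsB]
    by_cases hn : n > 0
    · simp only [hn, dif_pos]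
      rw [ih (n / 1000) (Nat.div_lt_self hn (by norm_num))]
      by_cases hg : n % 1000 ≠ 0
      · rw [if_pos hg, if_pos hg, pvThreeDigit_eq (n % 1000) (Nat.mod_lt _ (by norm_num))]
        simp [String.append_assoc]
      · simp [hg]
    · simp [hn]

theorem pv_main : ∀ number : Int,
    convert_number_to_rupiah_terbilang number = convert_number_to_rupiah_terbilang_alt number := by
  intro number
  unfold convert_number_to_rupiah_terbilang convert_number_to_rupiah_terbilang_alt
  by_cases h0 : number = 0
  · simp [h0]
  · simp only [h0, if_false]
    rw [pvLoop_eq]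
    simp

-- ===== VERDICT (by name: the statement is the Claim_ definition above) =====
theorem convert_number_to_rupiah_terbilang_spec : Claim_equal_convert_number_to_rupiah_terbilang := by
  intro number _
  exact pv_main number
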